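-- pv_equiv track=rewrite | github.com/cyberpunk042/openfleet | fleet/core/plane_methodology.py | extract_readiness_from_labels
-- ===== SOURCE A (Python) =====
-- VALID_READINESS = [0, 5, 10, 20, 30, 50, 70, 80, 90, 95, 99, 100]
--
-- READINESS_PREFIX = "readiness:"
--
-- def extract_readiness_from_labels(label_names: list[str]) -> int:
--     """Extract the readiness percentage from a list of label names.
--
--     Returns the readiness value (e.g., 50) or 0 if no readiness label.
--     If multiple readiness labels exist, returns the highest.
--     """
--     readiness = 0
--     for name in label_names:
--         if name.startswith(READINESS_PREFIX):
--             try: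
--                 value = int(name[len(READINESS_PREFIX):])
--                 if value in VALID_READINESS and value > readiness:
--                     readiness = value
--             except ValueError:
--                 continue
--     return readiness
-- ===== SOURCE B (Python) =====
-- VALID_READINESS = [0, 5, 10, 20, 30, 50, 70, 80, 90, 95, 99, 100]
--
-- READINESS_PREFIX = "readiness:"
--
-- def extract_readiness_from_labels(label_names: list[str]) -> int:
--     """Collect the valid readiness values present, then scan the fixed
--     ranking from highest to lowest and return the first one present."""
--     present = set()
--     for name in label_names:
--         if name.startswith(READINESS_PREFIX):
--             try:
--                 value = int(name[len(READINESS_PREFIX):])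
--             except ValueError:
--                 continue
--             if value in VALID_READINESS:
--                 present.add(value)
--     for value in reversed(VALID_READINESS):
--         if value in present:
--             return value
--     return 0
-- ===== Notes on version B (the rewrite author's own statement) =====
-- stated objective: alternative
-- what changed: Instead of maintaining a running maximum while iterating labels, B first builds a set of the valid readiness values present and then scans the fixed VALID_READINESS ranking from highest to lowest, returning the first value present (0 if none).
import Mathlib
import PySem

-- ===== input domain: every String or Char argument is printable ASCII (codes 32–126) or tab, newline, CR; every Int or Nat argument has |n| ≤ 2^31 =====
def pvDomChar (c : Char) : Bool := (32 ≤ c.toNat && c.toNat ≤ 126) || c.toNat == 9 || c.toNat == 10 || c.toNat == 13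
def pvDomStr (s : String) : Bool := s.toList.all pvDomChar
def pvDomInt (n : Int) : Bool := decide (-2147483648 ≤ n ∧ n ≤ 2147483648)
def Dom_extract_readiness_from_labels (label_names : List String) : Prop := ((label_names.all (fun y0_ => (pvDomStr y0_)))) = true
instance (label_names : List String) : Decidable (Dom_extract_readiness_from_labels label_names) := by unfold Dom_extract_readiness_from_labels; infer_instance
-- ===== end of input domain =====

-- B replaces A's running maximum with a set of present valid values plus a
-- highest-to-lowest scan of the fixed ranking (objective: alternative decomposition).

-- ===== PORT A =====
def VALID_READINESS : List Int := [0, 5, 10, 20, 30, 50, 70, 80, 90, 95, 99, 100]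

def READINESS_PREFIX : String := "readiness:"

def extract_readiness_from_labels (label_names : List String) : Int :=
  label_names.foldl (fun readiness name =>
    if PySem.Str.startswith name READINESS_PREFIX then
      match PySem.Int.ofStr? (PySem.Str.slice name (some (PySem.Str.len READINESS_PREFIX)) none) with
      | some value => if value ∈ VALID_READINESS ∧ value > readiness then value else readiness
      | none => readiness
    else readiness) 0

-- ===== PORT B =====
-- B-side helper: the early-return scan over reversed(VALID_READINESS)
def pvScanRank : List Int → PySem.Set Int → Int
  | [], _ => 0
  | v :: rest, s => if v ∈ s then v else pvScanRank rest s

def extract_readiness_from_labels_alt (label_names : List String) : Int :=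
  let present : PySem.Set Int := label_names.foldl (fun present name =>
    if PySem.Str.startswith name READINESS_PREFIX then
      match PySem.Int.ofStr? (PySem.Str.slice name (some (PySem.Str.len READINESS_PREFIX)) none) with
      | some value => if value ∈ VALID_READINESS then PySem.Set.add present value else present
      | none => present
    else present) PySem.Set.empty
  pvScanRank VALID_READINESS.reverse present

-- ===== PRECONDITION & SPEC =====
def Spec_extract_readiness_from_labels (label_names : List String) (out : Int) : Prop := out = extract_readiness_from_labels_alt label_names
instance (label_names : List String) (out : Int) : Decidable (Spec_extract_readiness_from_labels label_names out) := by unfold Spec_extract_readiness_from_labels; infer_instance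

-- ===== CLAIM (what is proved, stated in full; the proofs are below) =====
def Claim_equal_extract_readiness_from_labels : Prop := ∀ (label_names : List String), Dom_extract_readiness_from_labels label_names → Spec_extract_readiness_from_labels label_names (extract_readiness_from_labels label_names)

-- ===== LEMMAS AND PROOFS =====

lemma pv_valid_nonneg : ∀ v ∈ VALID_READINESS, 0 ≤ v := by decide

-- the scan returns r when r is present and bounds every present value
lemma pv_scan_found (d : List Int) (s : PySem.Set Int) (r : Int)
    (hd : d.Pairwise (· > ·)) (hrd : r ∈ d) (hrs : r ∈ s)
    (hub : ∀ v ∈ s, v ≤ r) : pvScanRank d s = r := by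
  induction d with
  | nil => cases hrd
  | cons x rest ih =>
    simp only [pvScanRank]
    by_cases hx : x ∈ s
    · have hxr : x ≤ r := hub x hx
      rcases List.mem_cons.mp hrd with rfl | hr'
      · rw [if_pos hx]
      · exact absurd ((List.pairwise_cons.mp hd).1 r hr') (by omega)
    · rw [if_neg hx]
      rcases List.mem_cons.mp hrd with rfl | hr'
      · exact absurd hrs hx
      · exact ih (List.pairwise_cons.mp hd).2 hr'
lemma pv_scan_none (d : List Int) (s : PySem.Set Int) (h : ∀ v, v ∉ s) :
    pvScanRank d s = 0 := by
  induction d with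
  | nil => rfl
  | cons x rest ih => simp only [pvScanRank, if_neg (h x)]; exact ih

-- the loop invariant tying B's present-set to A's running maximum
lemma pv_main (labels : List String) : ∀ (s : PySem.Set Int) (r : Int),
    (∀ v ∈ s, v ∈ VALID_READINESS ∧ v ≤ r) → (r = 0 ∨ r ∈ s) → r ∈ VALID_READINESS →
    pvScanRank VALID_READINESS.reverse
      (labels.foldl (fun present name =>
        if PySem.Str.startswith name READINESS_PREFIX then
          match PySem.Int.ofStr? (PySem.Str.slice name (some (PySem.Str.len READINESS_PREFIX)) none) with
          | some value => if value ∈ VALID_READINESS then PySem.Set.add present value else present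
          | none => present
        else present) s)
    = labels.foldl (fun readiness name =>
        if PySem.Str.startswith name READINESS_PREFIX then
          match PySem.Int.ofStr? (PySem.Str.slice name (some (PySem.Str.len READINESS_PREFIX)) none) with
          | some value => if value ∈ VALID_READINESS ∧ value > readiness then value else readiness
          | none => readiness
        else readiness) r := by
  induction labels with
  | nil =>
    intro s r hub hr hrv
    simp only [List.foldl_nil]
    rcases hr with rfl | hrs
    · by_cases h0 : (0:Int) ∈ s
      · exact pv_scan_found _ _ _ (by decide) (by decide) h0 (fun v hv => (hub v hv).2)
      · refine pv_scan_none _ _ ?_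
        intro v hv
        have h := hub v hv
        have hv0 : v = 0 := by have := pv_valid_nonneg v h.1; omega
        exact absurd (hv0 ▸ hv) h0
    · exact pv_scan_found _ _ _ (by decide) (List.mem_reverse.mpr hrv) hrs
        (fun v hv => (hub v hv).2)
  | cons name rest ih =>
    intro s r hub hr hrv
    simp only [List.foldl_cons]
    by_cases hsw : PySem.Str.startswith name READINESS_PREFIX
    · simp only [hsw, if_true]
      cases hp : PySem.Int.ofStr? (PySem.Str.slice name (some (PySem.Str.len READINESS_PREFIX)) none) with
      | none => exact ih s r hub hr hrv
      | some v =>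
        by_cases hv : v ∈ VALID_READINESS
        · by_cases hgt : v > r
          · simp only [hv, hgt, and_true, if_true]
            refine ih (PySem.Set.add s v) v ?_ (Or.inr ?_) hv
            · intro w hw
              rcases (PySem.Set.mem_add s v w).mp hw with hw' | rfl
              · exact ⟨(hub w hw').1, le_trans (hub w hw').2 (le_of_lt hgt)⟩
              · exact ⟨hv, le_refl _⟩
            · exact (PySem.Set.mem_add s v v).mpr (Or.inr rfl)
          · simp only [hv, hgt, and_false, if_true, if_false]
            refine ih (PySem.Set.add s v) r ?_ ?_ hrv
            · intro w hw
              rcases (PySem.Set.mem_add s v w).mp hw with hw' | rfl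
              · exact hub w hw'
              · exact ⟨hv, by omega⟩
            · rcases hr with rfl | hrs
              · exact Or.inl rfl
              · exact Or.inr ((PySem.Set.mem_add s v r).mpr (Or.inl hrs))
        · simp only [hv, false_and, if_false]
          exact ih s r hub hr hrv
    · simp only [hsw, Bool.false_eq_true, if_false]
      exact ih s r hub hr hrv

-- ===== VERDICT (by name: the statement is the Claim_ definition above) =====
theorem extract_readiness_from_labels_spec : Claim_equal_extract_readiness_from_labels := by
  intro labels _
  unfold Spec_extract_readiness_from_labels extract_readiness_from_labels extract_readiness_from_labels_alt
  exact (pv_main labels PySem.Set.empty 0 (by intro v hv; cases hv) (Or.inl rfl) (by decide)).symm
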